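-- pv_equiv track=rewrite | github.com/drhayf/GUTTERS | src/app/modules/calculation/astrology/brain/calculator.py | _calculate_elements
-- ===== SOURCE A (Python) =====
-- def _calculate_elements(planets: list[dict]) -> dict[str, int]:
--     """Calculate element distribution from planet positions."""
--     element_map = {
--         "Ari": "fire",
--         "Leo": "fire",
--         "Sag": "fire",
--         "Tau": "earth",
--         "Vir": "earth",
--         "Cap": "earth",
--         "Gem": "air",
--         "Lib": "air",
--         "Aqu": "air",
--         "Can": "water",
--         "Sco": "water",
--         "Pis": "water",
--     }
--
--     elements = {"fire": 0, "earth": 0, "air": 0, "water": 0}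
--
--     for planet in planets:
--         sign = planet.get("sign", "")[:3]
--         if sign in element_map:
--             elements[element_map[sign]] += 1
--
--     return elements
-- ===== SOURCE B (Python) =====
-- def _calculate_elements(planets: list[dict]) -> dict[str, int]:
--     """Calculate element distribution from planet positions."""
--     element_signs = {
--         "fire": {"Ari", "Leo", "Sag"},
--         "earth": {"Tau", "Vir", "Cap"},
--         "air": {"Gem", "Lib", "Aqu"},
--         "water": {"Can", "Sco", "Pis"},
--     }
--     return {
--         elem: sum(1 for p in planets if p.get("sign", "")[:3] in signs)
--         for elem, signs in element_signs.items()
--     }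
-- ===== Notes on version B (the rewrite author's own statement) =====
-- stated objective: simpler
-- what changed: Inverts the sign->element map into a grouping of signs per element and builds the result as a dict comprehension counting per element group (four membership scans) instead of one incrementing pass over a mutable counter dict.
import Mathlib
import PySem

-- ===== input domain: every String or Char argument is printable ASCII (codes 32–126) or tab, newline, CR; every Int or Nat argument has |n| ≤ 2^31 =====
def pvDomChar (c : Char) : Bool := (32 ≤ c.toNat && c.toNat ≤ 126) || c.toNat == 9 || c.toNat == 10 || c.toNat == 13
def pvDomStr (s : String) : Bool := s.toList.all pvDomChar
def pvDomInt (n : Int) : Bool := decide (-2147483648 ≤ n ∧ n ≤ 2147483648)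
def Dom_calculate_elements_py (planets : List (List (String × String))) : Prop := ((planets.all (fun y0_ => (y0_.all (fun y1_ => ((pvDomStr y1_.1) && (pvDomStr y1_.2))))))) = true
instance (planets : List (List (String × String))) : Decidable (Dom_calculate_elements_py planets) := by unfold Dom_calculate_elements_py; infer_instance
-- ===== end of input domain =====

-- B inverts the sign→element map into sign groups per element and counts each group
-- with a dict comprehension (four membership scans) instead of one incrementing pass:
-- simpler decomposition, same results.

-- ===== PORT A =====
-- element_map of A, a literal dict
def pvElementMap : PySem.Dict String String := PySem.Dict.mk
  [("Ari", "fire"), ("Leo", "fire"), ("Sag", "fire"),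
   ("Tau", "earth"), ("Vir", "earth"), ("Cap", "earth"),
   ("Gem", "air"), ("Lib", "air"), ("Aqu", "air"),
   ("Can", "water"), ("Sco", "water"), ("Pis", "water")]

-- planet.get("sign", "")[:3]
def pvSignA (planet : List (String × String)) : String :=
  PySem.Str.slice (PySem.Dict.getD (PySem.Dict.mk planet) "sign" "") none (some 3)

def calculate_elements_py (planets : List (List (String × String))) : List (String × Int) :=
  (planets.foldl
    (fun elements planet =>
      let sign := pvSignA planet
      match pvElementMap.get? sign with
      | some e => elements.modify e 0 (· + 1)   -- elements[element_map[sign]] += 1 (key always present)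
      | none => elements)
    (PySem.Dict.mk [("fire", (0 : Int)), ("earth", 0), ("air", 0), ("water", 0)])).items

-- ===== PORT B =====
def pvElementSigns : List (String × PySem.Set String) :=
  [("fire", PySem.Set.ofList ["Ari", "Leo", "Sag"]),
   ("earth", PySem.Set.ofList ["Tau", "Vir", "Cap"]),
   ("air", PySem.Set.ofList ["Gem", "Lib", "Aqu"]),
   ("water", PySem.Set.ofList ["Can", "Sco", "Pis"])]

def pvSignB (planet : List (String × String)) : String :=
  PySem.Str.slice (PySem.Dict.getD (PySem.Dict.mk planet) "sign" "") none (some 3)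

def calculate_elements_py_alt (planets : List (List (String × String))) : List (String × Int) :=
  pvElementSigns.map (fun es =>
    (es.1, planets.foldl (fun acc p => if PySem.Set.contains es.2 (pvSignB p) then acc + 1 else acc) (0 : Int)))

-- ===== PRECONDITION & SPEC =====
def Spec_calculate_elements_py (planets : List (List (String × String))) (out : List (String × Int)) : Prop := out = calculate_elements_py_alt planets
instance (planets : List (List (String × String))) (out : List (String × Int)) : Decidable (Spec_calculate_elements_py planets out) := by unfold Spec_calculate_elements_py; infer_instance

-- ===== CLAIM (what is proved, stated in full; the proofs are below) =====
def Claim_equal_calculate_elements_py : Prop := ∀ (planets : List (List (String × String))), Dom_calculate_elements_py planets → Spec_calculate_elements_py planets (calculate_elements_py planets)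

-- ===== LEMMAS AND PROOFS =====

-- the loop step of A
def pvStep (elements : PySem.Dict String Int) (planet : List (String × String)) : PySem.Dict String Int :=
  match pvElementMap.get? (pvSignA planet) with
  | some e => elements.modify e 0 (· + 1)
  | none => elements

-- how many planets of l fall on element v under A's map
def pvCnt (v : String) (l : List (List (String × String))) : Int :=
  (l.countP (fun p => pvElementMap.get? (pvSignA p) == some v) : Int)

theorem pvMap_values (s v : String) (h : pvElementMap.get? s = some v) :
    v = "fire" ∨ v = "earth" ∨ v = "air" ∨ v = "water" := by
  have hm : (s, v) ∈ pvElementMap.items := by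
    apply PySem.Dict.mem_items_of_get?_eq_some
    exact h
  simp only [pvElementMap, PySem.Dict.items, List.mem_cons, List.not_mem_nil, or_false,
    Prod.mk.injEq] at hm
  rcases hm with ⟨-, rfl⟩ | ⟨-, rfl⟩ | ⟨-, rfl⟩ | ⟨-, rfl⟩ | ⟨-, rfl⟩ | ⟨-, rfl⟩ | ⟨-, rfl⟩ | ⟨-, rfl⟩ | ⟨-, rfl⟩ | ⟨-, rfl⟩ | ⟨-, rfl⟩ | ⟨-, rfl⟩ <;> tauto

theorem pvLoop (l : List (List (String × String))) :
    ∀ a e r w : Int,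
      l.foldl pvStep (PySem.Dict.mk [("fire", a), ("earth", e), ("air", r), ("water", w)]) =
        PySem.Dict.mk [("fire", a + pvCnt "fire" l), ("earth", e + pvCnt "earth" l),
                       ("air", r + pvCnt "air" l), ("water", w + pvCnt "water" l)] := by
  induction l with
  | nil => intro a e r w; simp [pvCnt]
  | cons p t ih =>
    intro a e r w
    rw [List.foldl_cons]
    cases h : pvElementMap.get? (pvSignA p) with
    | none =>
      simp only [pvStep, h]
      rw [ih]
      simp [pvCnt, List.countP_cons, h]
    | some v =>
      rcases pvMap_values _ _ h with rfl | rfl | rfl | rfl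
      · have hc : (PySem.Dict.mk [("fire", a), ("earth", e), ("air", r), ("water", w)]).contains "fire" = true := by
          simp [PySem.Dict.contains_mk]
        have hmod : (PySem.Dict.mk [("fire", a), ("earth", e), ("air", r), ("water", w)]).modify "fire" 0 (· + 1)
            = PySem.Dict.mk [("fire", a + 1), ("earth", e), ("air", r), ("water", w)] := by
          apply PySem.Dict.ext
          simp [PySem.Dict.modify, PySem.Dict.items_insert_of_contains _ _ hc,
                PySem.Dict.getD, PySem.Dict.get?_mk_cons]
        simp only [pvStep, h]
        rw [hmod, ih]
        simp only [pvCnt, List.countP_cons, h, PySem.Dict.mk.injEq, List.cons.injEq,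
          Prod.mk.injEq, beq_iff_eq, Option.some.injEq, and_true, true_and]
        norm_num
        omega
      · have hc : (PySem.Dict.mk [("fire", a), ("earth", e), ("air", r), ("water", w)]).contains "earth" = true := by
          simp [PySem.Dict.contains_mk]
        have hmod : (PySem.Dict.mk [("fire", a), ("earth", e), ("air", r), ("water", w)]).modify "earth" 0 (· + 1)
            = PySem.Dict.mk [("fire", a), ("earth", e + 1), ("air", r), ("water", w)] := by
          apply PySem.Dict.ext
          simp [PySem.Dict.modify, PySem.Dict.items_insert_of_contains _ _ hc,
                PySem.Dict.getD, PySem.Dict.get?_mk_cons]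
        simp only [pvStep, h]
        rw [hmod, ih]
        simp only [pvCnt, List.countP_cons, h, PySem.Dict.mk.injEq, List.cons.injEq,
          Prod.mk.injEq, beq_iff_eq, Option.some.injEq, and_true, true_and]
        norm_num
        omega
      · have hc : (PySem.Dict.mk [("fire", a), ("earth", e), ("air", r), ("water", w)]).contains "air" = true := by
          simp [PySem.Dict.contains_mk]
        have hmod : (PySem.Dict.mk [("fire", a), ("earth", e), ("air", r), ("water", w)]).modify "air" 0 (· + 1)
            = PySem.Dict.mk [("fire", a), ("earth", e), ("air", r + 1), ("water", w)] := by
          apply PySem.Dict.ext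
          simp [PySem.Dict.modify, PySem.Dict.items_insert_of_contains _ _ hc,
                PySem.Dict.getD, PySem.Dict.get?_mk_cons]
        simp only [pvStep, h]
        rw [hmod, ih]
        simp only [pvCnt, List.countP_cons, h, PySem.Dict.mk.injEq, List.cons.injEq,
          Prod.mk.injEq, beq_iff_eq, Option.some.injEq, and_true, true_and]
        norm_num
        omega
      · have hc : (PySem.Dict.mk [("fire", a), ("earth", e), ("air", r), ("water", w)]).contains "water" = true := by
          simp [PySem.Dict.contains_mk]
        have hmod : (PySem.Dict.mk [("fire", a), ("earth", e), ("air", r), ("water", w)]).modify "water" 0 (· + 1)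
            = PySem.Dict.mk [("fire", a), ("earth", e), ("air", r), ("water", w + 1)] := by
          apply PySem.Dict.ext
          simp [PySem.Dict.modify, PySem.Dict.items_insert_of_contains _ _ hc,
                PySem.Dict.getD, PySem.Dict.get?_mk_cons]
        simp only [pvStep, h]
        rw [hmod, ih]
        simp only [pvCnt, List.countP_cons, h, PySem.Dict.mk.injEq, List.cons.injEq,
          Prod.mk.injEq, beq_iff_eq, Option.some.injEq, and_true, true_and]
        norm_num
        omega

theorem pvFoldl_count (l : List (List (String × String))) (q : List (String × String) → Bool)
    (c : Int) :
    l.foldl (fun acc p => if q p then acc + 1 else acc) c = c + (l.countP q : Int) := by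
  induction l generalizing c with
  | nil => simp
  | cons p t ih =>
    rw [List.foldl_cons, ih, List.countP_cons]
    by_cases h : q p <;> simp [h] <;> omega

-- A's lookup misses for a string that is none of the twelve sign keys
theorem pvGet_none (s : String)
    (h1 : ¬ s = "Ari") (h2 : ¬ s = "Leo") (h3 : ¬ s = "Sag")
    (h4 : ¬ s = "Tau") (h5 : ¬ s = "Vir") (h6 : ¬ s = "Cap")
    (h7 : ¬ s = "Gem") (h8 : ¬ s = "Lib") (h9 : ¬ s = "Aqu")
    (h10 : ¬ s = "Can") (h11 : ¬ s = "Sco") (h12 : ¬ s = "Pis") :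
    pvElementMap.get? s = none := by
  have b1 : ("Ari" == s) = false := beq_eq_false_iff_ne.mpr fun e => h1 e.symm
  have b2 : ("Leo" == s) = false := beq_eq_false_iff_ne.mpr fun e => h2 e.symm
  have b3 : ("Sag" == s) = false := beq_eq_false_iff_ne.mpr fun e => h3 e.symm
  have b4 : ("Tau" == s) = false := beq_eq_false_iff_ne.mpr fun e => h4 e.symm
  have b5 : ("Vir" == s) = false := beq_eq_false_iff_ne.mpr fun e => h5 e.symm
  have b6 : ("Cap" == s) = false := beq_eq_false_iff_ne.mpr fun e => h6 e.symm
  have b7 : ("Gem" == s) = false := beq_eq_false_iff_ne.mpr fun e => h7 e.symm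
  have b8 : ("Lib" == s) = false := beq_eq_false_iff_ne.mpr fun e => h8 e.symm
  have b9 : ("Aqu" == s) = false := beq_eq_false_iff_ne.mpr fun e => h9 e.symm
  have b10 : ("Can" == s) = false := beq_eq_false_iff_ne.mpr fun e => h10 e.symm
  have b11 : ("Sco" == s) = false := beq_eq_false_iff_ne.mpr fun e => h11 e.symm
  have b12 : ("Pis" == s) = false := beq_eq_false_iff_ne.mpr fun e => h12 e.symm
  simp only [pvElementMap, PySem.Dict.get?_mk_cons, b1, b2, b3, b4, b5, b6, b7, b8, b9, b10,
    b11, b12, Bool.false_eq_true, if_false]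
  rfl

-- the per-element membership test of B agrees with A's map lookup, for every string
theorem pvPred_fire (s : String) :
    PySem.Set.contains (PySem.Set.ofList ["Ari", "Leo", "Sag"]) s =
      (pvElementMap.get? s == some "fire") := by
  by_cases h1 : s = "Ari"; · subst h1; simp [pvElementMap, PySem.Dict.get?_mk_cons, PySem.Set.ofList, PySem.Set.contains, PySem.Set.add, PySem.Set.empty]
  by_cases h2 : s = "Leo"; · subst h2; simp [pvElementMap, PySem.Dict.get?_mk_cons, PySem.Set.ofList, PySem.Set.contains, PySem.Set.add, PySem.Set.empty]
  by_cases h3 : s = "Sag"; · subst h3; simp [pvElementMap, PySem.Dict.get?_mk_cons, PySem.Set.ofList, PySem.Set.contains, PySem.Set.add, PySem.Set.empty]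
  by_cases h4 : s = "Tau"; · subst h4; simp [pvElementMap, PySem.Dict.get?_mk_cons, PySem.Set.ofList, PySem.Set.contains, PySem.Set.add, PySem.Set.empty]
  by_cases h5 : s = "Vir"; · subst h5; simp [pvElementMap, PySem.Dict.get?_mk_cons, PySem.Set.ofList, PySem.Set.contains, PySem.Set.add, PySem.Set.empty]
  by_cases h6 : s = "Cap"; · subst h6; simp [pvElementMap, PySem.Dict.get?_mk_cons, PySem.Set.ofList, PySem.Set.contains, PySem.Set.add, PySem.Set.empty]
  by_cases h7 : s = "Gem"; · subst h7; simp [pvElementMap, PySem.Dict.get?_mk_cons, PySem.Set.ofList, PySem.Set.contains, PySem.Set.add, PySem.Set.empty]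
  by_cases h8 : s = "Lib"; · subst h8; simp [pvElementMap, PySem.Dict.get?_mk_cons, PySem.Set.ofList, PySem.Set.contains, PySem.Set.add, PySem.Set.empty]
  by_cases h9 : s = "Aqu"; · subst h9; simp [pvElementMap, PySem.Dict.get?_mk_cons, PySem.Set.ofList, PySem.Set.contains, PySem.Set.add, PySem.Set.empty]
  by_cases h10 : s = "Can"; · subst h10; simp [pvElementMap, PySem.Dict.get?_mk_cons, PySem.Set.ofList, PySem.Set.contains, PySem.Set.add, PySem.Set.empty]
  by_cases h11 : s = "Sco"; · subst h11; simp [pvElementMap, PySem.Dict.get?_mk_cons, PySem.Set.ofList, PySem.Set.contains, PySem.Set.add, PySem.Set.empty]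
  by_cases h12 : s = "Pis"; · subst h12; simp [pvElementMap, PySem.Dict.get?_mk_cons, PySem.Set.ofList, PySem.Set.contains, PySem.Set.add, PySem.Set.empty]
  rw [pvGet_none s h1 h2 h3 h4 h5 h6 h7 h8 h9 h10 h11 h12]
  simp [PySem.Set.ofList, PySem.Set.contains, PySem.Set.add, PySem.Set.empty, h1, h2, h3]

theorem pvPred_earth (s : String) :
    PySem.Set.contains (PySem.Set.ofList ["Tau", "Vir", "Cap"]) s =
      (pvElementMap.get? s == some "earth") := by
  by_cases h1 : s = "Ari"; · subst h1; simp [pvElementMap, PySem.Dict.get?_mk_cons, PySem.Set.ofList, PySem.Set.contains, PySem.Set.add, PySem.Set.empty]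
  by_cases h2 : s = "Leo"; · subst h2; simp [pvElementMap, PySem.Dict.get?_mk_cons, PySem.Set.ofList, PySem.Set.contains, PySem.Set.add, PySem.Set.empty]
  by_cases h3 : s = "Sag"; · subst h3; simp [pvElementMap, PySem.Dict.get?_mk_cons, PySem.Set.ofList, PySem.Set.contains, PySem.Set.add, PySem.Set.empty]
  by_cases h4 : s = "Tau"; · subst h4; simp [pvElementMap, PySem.Dict.get?_mk_cons, PySem.Set.ofList, PySem.Set.contains, PySem.Set.add, PySem.Set.empty]
  by_cases h5 : s = "Vir"; · subst h5; simp [pvElementMap, PySem.Dict.get?_mk_cons, PySem.Set.ofList, PySem.Set.contains, PySem.Set.add, PySem.Set.empty]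
  by_cases h6 : s = "Cap"; · subst h6; simp [pvElementMap, PySem.Dict.get?_mk_cons, PySem.Set.ofList, PySem.Set.contains, PySem.Set.add, PySem.Set.empty]
  by_cases h7 : s = "Gem"; · subst h7; simp [pvElementMap, PySem.Dict.get?_mk_cons, PySem.Set.ofList, PySem.Set.contains, PySem.Set.add, PySem.Set.empty]
  by_cases h8 : s = "Lib"; · subst h8; simp [pvElementMap, PySem.Dict.get?_mk_cons, PySem.Set.ofList, PySem.Set.contains, PySem.Set.add, PySem.Set.empty]
  by_cases h9 : s = "Aqu"; · subst h9; simp [pvElementMap, PySem.Dict.get?_mk_cons, PySem.Set.ofList, PySem.Set.contains, PySem.Set.add, PySem.Set.empty]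
  by_cases h10 : s = "Can"; · subst h10; simp [pvElementMap, PySem.Dict.get?_mk_cons, PySem.Set.ofList, PySem.Set.contains, PySem.Set.add, PySem.Set.empty]
  by_cases h11 : s = "Sco"; · subst h11; simp [pvElementMap, PySem.Dict.get?_mk_cons, PySem.Set.ofList, PySem.Set.contains, PySem.Set.add, PySem.Set.empty]
  by_cases h12 : s = "Pis"; · subst h12; simp [pvElementMap, PySem.Dict.get?_mk_cons, PySem.Set.ofList, PySem.Set.contains, PySem.Set.add, PySem.Set.empty]
  rw [pvGet_none s h1 h2 h3 h4 h5 h6 h7 h8 h9 h10 h11 h12]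
  simp [PySem.Set.ofList, PySem.Set.contains, PySem.Set.add, PySem.Set.empty, h4, h5, h6]

theorem pvPred_air (s : String) :
    PySem.Set.contains (PySem.Set.ofList ["Gem", "Lib", "Aqu"]) s =
      (pvElementMap.get? s == some "air") := by
  by_cases h1 : s = "Ari"; · subst h1; simp [pvElementMap, PySem.Dict.get?_mk_cons, PySem.Set.ofList, PySem.Set.contains, PySem.Set.add, PySem.Set.empty]
  by_cases h2 : s = "Leo"; · subst h2; simp [pvElementMap, PySem.Dict.get?_mk_cons, PySem.Set.ofList, PySem.Set.contains, PySem.Set.add, PySem.Set.empty]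
  by_cases h3 : s = "Sag"; · subst h3; simp [pvElementMap, PySem.Dict.get?_mk_cons, PySem.Set.ofList, PySem.Set.contains, PySem.Set.add, PySem.Set.empty]
  by_cases h4 : s = "Tau"; · subst h4; simp [pvElementMap, PySem.Dict.get?_mk_cons, PySem.Set.ofList, PySem.Set.contains, PySem.Set.add, PySem.Set.empty]
  by_cases h5 : s = "Vir"; · subst h5; simp [pvElementMap, PySem.Dict.get?_mk_cons, PySem.Set.ofList, PySem.Set.contains, PySem.Set.add, PySem.Set.empty]
  by_cases h6 : s = "Cap"; · subst h6; simp [pvElementMap, PySem.Dict.get?_mk_cons, PySem.Set.ofList, PySem.Set.contains, PySem.Set.add, PySem.Set.empty]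
  by_cases h7 : s = "Gem"; · subst h7; simp [pvElementMap, PySem.Dict.get?_mk_cons, PySem.Set.ofList, PySem.Set.contains, PySem.Set.add, PySem.Set.empty]
  by_cases h8 : s = "Lib"; · subst h8; simp [pvElementMap, PySem.Dict.get?_mk_cons, PySem.Set.ofList, PySem.Set.contains, PySem.Set.add, PySem.Set.empty]
  by_cases h9 : s = "Aqu"; · subst h9; simp [pvElementMap, PySem.Dict.get?_mk_cons, PySem.Set.ofList, PySem.Set.contains, PySem.Set.add, PySem.Set.empty]
  by_cases h10 : s = "Can"; · subst h10; simp [pvElementMap, PySem.Dict.get?_mk_cons, PySem.Set.ofList, PySem.Set.contains, PySem.Set.add, PySem.Set.empty]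
  by_cases h11 : s = "Sco"; · subst h11; simp [pvElementMap, PySem.Dict.get?_mk_cons, PySem.Set.ofList, PySem.Set.contains, PySem.Set.add, PySem.Set.empty]
  by_cases h12 : s = "Pis"; · subst h12; simp [pvElementMap, PySem.Dict.get?_mk_cons, PySem.Set.ofList, PySem.Set.contains, PySem.Set.add, PySem.Set.empty]
  rw [pvGet_none s h1 h2 h3 h4 h5 h6 h7 h8 h9 h10 h11 h12]
  simp [PySem.Set.ofList, PySem.Set.contains, PySem.Set.add, PySem.Set.empty, h7, h8, h9]

theorem pvPred_water (s : String) :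
    PySem.Set.contains (PySem.Set.ofList ["Can", "Sco", "Pis"]) s =
      (pvElementMap.get? s == some "water") := by
  by_cases h1 : s = "Ari"; · subst h1; simp [pvElementMap, PySem.Dict.get?_mk_cons, PySem.Set.ofList, PySem.Set.contains, PySem.Set.add, PySem.Set.empty]
  by_cases h2 : s = "Leo"; · subst h2; simp [pvElementMap, PySem.Dict.get?_mk_cons, PySem.Set.ofList, PySem.Set.contains, PySem.Set.add, PySem.Set.empty]
  by_cases h3 : s = "Sag"; · subst h3; simp [pvElementMap, PySem.Dict.get?_mk_cons, PySem.Set.ofList, PySem.Set.contains, PySem.Set.add, PySem.Set.empty]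
  by_cases h4 : s = "Tau"; · subst h4; simp [pvElementMap, PySem.Dict.get?_mk_cons, PySem.Set.ofList, PySem.Set.contains, PySem.Set.add, PySem.Set.empty]
  by_cases h5 : s = "Vir"; · subst h5; simp [pvElementMap, PySem.Dict.get?_mk_cons, PySem.Set.ofList, PySem.Set.contains, PySem.Set.add, PySem.Set.empty]
  by_cases h6 : s = "Cap"; · subst h6; simp [pvElementMap, PySem.Dict.get?_mk_cons, PySem.Set.ofList, PySem.Set.contains, PySem.Set.add, PySem.Set.empty]
  by_cases h7 : s = "Gem"; · subst h7; simp [pvElementMap, PySem.Dict.get?_mk_cons, PySem.Set.ofList, PySem.Set.contains, PySem.Set.add, PySem.Set.empty]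
  by_cases h8 : s = "Lib"; · subst h8; simp [pvElementMap, PySem.Dict.get?_mk_cons, PySem.Set.ofList, PySem.Set.contains, PySem.Set.add, PySem.Set.empty]
  by_cases h9 : s = "Aqu"; · subst h9; simp [pvElementMap, PySem.Dict.get?_mk_cons, PySem.Set.ofList, PySem.Set.contains, PySem.Set.add, PySem.Set.empty]
  by_cases h10 : s = "Can"; · subst h10; simp [pvElementMap, PySem.Dict.get?_mk_cons, PySem.Set.ofList, PySem.Set.contains, PySem.Set.add, PySem.Set.empty]
  by_cases h11 : s = "Sco"; · subst h11; simp [pvElementMap, PySem.Dict.get?_mk_cons, PySem.Set.ofList, PySem.Set.contains, PySem.Set.add, PySem.Set.empty]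
  by_cases h12 : s = "Pis"; · subst h12; simp [pvElementMap, PySem.Dict.get?_mk_cons, PySem.Set.ofList, PySem.Set.contains, PySem.Set.add, PySem.Set.empty]
  rw [pvGet_none s h1 h2 h3 h4 h5 h6 h7 h8 h9 h10 h11 h12]
  simp [PySem.Set.ofList, PySem.Set.contains, PySem.Set.add, PySem.Set.empty, h10, h11, h12]

theorem pvCount_fire (l : List (List (String × String))) :
    l.foldl (fun acc p => if PySem.Set.contains (PySem.Set.ofList ["Ari", "Leo", "Sag"]) (pvSignA p) then acc + 1 else acc) (0 : Int)
      = pvCnt "fire" l := by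
  rw [pvFoldl_count, pvCnt, zero_add]
  exact congrArg _ (List.countP_congr (fun p _ => by rw [pvPred_fire (pvSignA p)]))

theorem pvCount_earth (l : List (List (String × String))) :
    l.foldl (fun acc p => if PySem.Set.contains (PySem.Set.ofList ["Tau", "Vir", "Cap"]) (pvSignA p) then acc + 1 else acc) (0 : Int)
      = pvCnt "earth" l := by
  rw [pvFoldl_count, pvCnt, zero_add]
  exact congrArg _ (List.countP_congr (fun p _ => by rw [pvPred_earth (pvSignA p)]))

theorem pvCount_air (l : List (List (String × String))) :
    l.foldl (fun acc p => if PySem.Set.contains (PySem.Set.ofList ["Gem", "Lib", "Aqu"]) (pvSignA p) then acc + 1 else acc) (0 : Int)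
      = pvCnt "air" l := by
  rw [pvFoldl_count, pvCnt, zero_add]
  exact congrArg _ (List.countP_congr (fun p _ => by rw [pvPred_air (pvSignA p)]))

theorem pvCount_water (l : List (List (String × String))) :
    l.foldl (fun acc p => if PySem.Set.contains (PySem.Set.ofList ["Can", "Sco", "Pis"]) (pvSignA p) then acc + 1 else acc) (0 : Int)
      = pvCnt "water" l := by
  rw [pvFoldl_count, pvCnt, zero_add]
  exact congrArg _ (List.countP_congr (fun p _ => by rw [pvPred_water (pvSignA p)]))

-- ===== VERDICT (by name: the statement is the Claim_ definition above) =====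
theorem calculate_elements_py_spec : Claim_equal_calculate_elements_py := by
  intro planets _
  unfold Spec_calculate_elements_py calculate_elements_py calculate_elements_py_alt
  have hfold : planets.foldl
      (fun elements planet =>
        match pvElementMap.get? (pvSignA planet) with
        | some e => elements.modify e 0 (· + 1)
        | none => elements)
      (PySem.Dict.mk [("fire", (0 : Int)), ("earth", 0), ("air", 0), ("water", 0)])
      = planets.foldl pvStep (PySem.Dict.mk [("fire", (0 : Int)), ("earth", 0), ("air", 0), ("water", 0)]) := rfl
  rw [hfold, pvLoop]
  have hsig : pvSignB = pvSignA := rfl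
  simp only [pvElementSigns, List.map_cons, List.map_nil, hsig, PySem.Dict.items,
    pvCount_fire, pvCount_earth, pvCount_air, pvCount_water, zero_add]
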